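-- pv_equiv track=rewrite | github.com/huangliangshidai/LearnHost | 生成代码/不同改进的比较/注意力机制的改进/5.py | minimize_factors
-- ===== SOURCE A (Python) =====
-- def minimize_factors(n, arr):
--     ones = arr.count(1)
--     twos = arr.count(2)
--     threes = arr.count(3)
--
--     # 计算红色元素 2 和红色元素 3 分别的因子数量
--     red_factors = twos * 2 + threes * 3
--
--     # 计算白色元素的因子数量
--     white_factors = ones
--
--     # 尽可能将红色元素 2 变成红色元素 3
--     while twos > 0 and threes > 0:
--         twos -= 1
--         threes -= 1
--         red_factors -= 2
--         red_factors += 3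
--
--     # 如果还有剩余的红色元素 2，将其中两个变成红色元素 3
--     if twos >= 2:
--         twos -= 2
--         red_factors -= 4
--         red_factors += 6
--
--     # 计算最终的因子数量和
--     result = red_factors + white_factors
--
--     return result
-- ===== SOURCE B (Python) =====
-- def minimize_factors(n, arr):
--     # Closed form: pairing one 2 with one 3 gains +1 each; a leftover pair of 2s gains +2 once.
--     ones = arr.count(1)
--     twos = arr.count(2)
--     threes = arr.count(3)
--     m = min(twos, threes)
--     result = ones + twos * 2 + threes * 3 + m
--     if twos - m >= 2:
--         result += 2
--     return result
-- ===== Notes on version B (the rewrite author's own statement) =====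
-- stated objective: simpler
-- what changed: Replaces the while loop (and the subsequent conditional swap) with a closed-form arithmetic expression using m = min(twos, threes).
import Mathlib
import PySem

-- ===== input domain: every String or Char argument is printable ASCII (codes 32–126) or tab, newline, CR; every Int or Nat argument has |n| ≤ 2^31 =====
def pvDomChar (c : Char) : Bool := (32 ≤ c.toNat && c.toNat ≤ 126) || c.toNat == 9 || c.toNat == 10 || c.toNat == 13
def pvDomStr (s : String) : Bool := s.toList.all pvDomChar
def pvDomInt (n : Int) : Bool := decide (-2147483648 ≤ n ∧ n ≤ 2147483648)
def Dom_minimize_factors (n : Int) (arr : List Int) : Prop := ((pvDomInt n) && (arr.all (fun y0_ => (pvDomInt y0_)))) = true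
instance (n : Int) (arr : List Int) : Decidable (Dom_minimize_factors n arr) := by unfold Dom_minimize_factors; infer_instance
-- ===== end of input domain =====

-- B replaces A's while loop and conditional with a closed-form arithmetic expression (objective: simpler).
-- ===== PORT A =====
-- the while loop: while twos > 0 and threes > 0: twos -= 1; threes -= 1; red -= 2; red += 3
def pvWhileA (twos threes red : Int) : Int × Int × Int :=
  if twos > 0 ∧ threes > 0 then
    pvWhileA (twos - 1) (threes - 1) (red - 2 + 3)
  else (twos, threes, red)
termination_by twos.toNat
decreasing_by omega

def minimize_factors (n : Int) (arr : List Int) : Int :=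
  let ones : Int := PySem.List.count arr 1
  let twos : Int := PySem.List.count arr 2
  let threes : Int := PySem.List.count arr 3
  let red_factors := twos * 2 + threes * 3
  let white_factors := ones
  let s := pvWhileA twos threes red_factors
  let twos := s.1
  let red_factors := s.2.2
  let red_factors := if twos ≥ 2 then red_factors - 4 + 6 else red_factors
  red_factors + white_factors

-- ===== PORT B =====
def minimize_factors_alt (n : Int) (arr : List Int) : Int :=
  let ones : Int := PySem.List.count arr 1
  let twos : Int := PySem.List.count arr 2
  let threes : Int := PySem.List.count arr 3
  let m := min twos threes
  let result := ones + twos * 2 + threes * 3 + m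
  if twos - m ≥ 2 then result + 2 else result

-- ===== PRECONDITION & SPEC =====
def Spec_minimize_factors (n : Int) (arr : List Int) (out : Int) : Prop := out = minimize_factors_alt n arr
instance (n : Int) (arr : List Int) (out : Int) : Decidable (Spec_minimize_factors n arr out) := by unfold Spec_minimize_factors; infer_instance

-- ===== CLAIM (what is proved, stated in full; the proofs are below) =====
def Claim_equal_minimize_factors : Prop := ∀ (n : Int) (arr : List Int), Dom_minimize_factors n arr → Spec_minimize_factors n arr (minimize_factors n arr)

-- ===== LEMMAS AND PROOFS =====

-- ===== VERDICT (by name: the statement is the Claim_ definition above) =====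
lemma pvWhileA_closed (k : Nat) : ∀ (twos threes red : Int), twos.toNat = k → 0 ≤ twos → 0 ≤ threes →
    pvWhileA twos threes red = (twos - min twos threes, threes - min twos threes, red + min twos threes) := by
  induction k with
  | zero =>
    intro twos threes red hk h2 h3
    rw [pvWhileA]
    have : twos = 0 := by omega
    simp [this]
    omega
  | succ k ih =>
    intro twos threes red hk h2 h3
    rw [pvWhileA]
    by_cases h : twos > 0 ∧ threes > 0
    · simp only [h, if_true]
      rw [ih (twos - 1) (threes - 1) (red - 2 + 3) (by omega) (by omega) (by omega)]
      have : min (twos - 1) (threes - 1) = min twos threes - 1 := by omega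
      rw [this]
      refine Prod.ext ?_ (Prod.ext ?_ ?_) <;> simp <;> ring
    · simp only [h, if_false]
      have hm : min twos threes = 0 := by
        rcases not_and_or.mp h with h' | h' <;> omega
      simp [hm]

theorem minimize_factors_spec : Claim_equal_minimize_factors := by
  intro n arr _
  unfold Spec_minimize_factors minimize_factors minimize_factors_alt
  generalize (PySem.List.count arr 1 : Int) = ones
  have h2 : (0:Int) ≤ (PySem.List.count arr 2 : Int) := Int.natCast_nonneg _
  have h3 : (0:Int) ≤ (PySem.List.count arr 3 : Int) := Int.natCast_nonneg _
  generalize (PySem.List.count arr 2 : Int) = twos at h2 ⊢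
  generalize (PySem.List.count arr 3 : Int) = threes at h3 ⊢
  simp only []
  rw [pvWhileA_closed twos.toNat twos threes _ rfl h2 h3]
  dsimp only
  split_ifs <;> omega
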